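-- pv_equiv track=rewrite | github.com/olsenw/LeetCodeExercises | Python3/maximum_difference_between_even_and_odd_frequency_II.py | maxDifference_fails
-- ===== SOURCE A (Python) =====
-- def maxDifference_fails(s: str, k: int) -> int:
--     def helper(a:str, b:str) -> int:
--         answer = -10**9 - 7
--         prefix = [[0,0]]
--         for c in s:
--             if c == a:
--                 prefix.append([prefix[-1][0] + 1, prefix[-1][1]])
--             if c == b:
--                 prefix.append([prefix[-1][0], prefix[-1][1] + 1])
--         pass
--         for i in range(len(prefix)):
--             for j in range(i + k, len(prefix)):
--                 a = prefix[j][0] - prefix[i][0]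
--                 b = prefix[j][1] - prefix[i][1]
--                 if a % 2 == b % 2:
--                     continue
--                 if a % 2:
--                     answer = max(answer, a - b)
--                 else:
--                     answer = max(answer, b - a)
--         return answer
--     answer = -10**9 - 7
--     for i in range(5):
--         for j in range(i+1,5):
--             a,b = chr(48 + i), chr(48 + j)
--             answer = max(answer, helper(a,b))
--     return answer
-- ===== SOURCE B (Python) =====
-- def maxDifference_fails(s: str, k: int) -> int:
--     NEG = -10**9 - 7
--
--     def helper(a: str, b: str) -> int:
--         # prefix counts of a and b, recorded only when one of them occurs
--         P = [(0, 0)]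
--         for c in s:
--             x, y = P[-1]
--             if c == a:
--                 P.append((x + 1, y))
--             elif c == b:
--                 P.append((x, y + 1))
--         m = len(P)
--         best = NEG
--         lo = {}  # (x%2, y%2) -> min of x-y over admitted prefixes
--         hi = {}  # (x%2, y%2) -> max of x-y over admitted prefixes
--         nxt = 0  # next prefix index to admit
--         for j in range(m):
--             # admit every prefix index i with i <= j - k
--             bound = min(m, max(nxt, j - k + 1))
--             for i in range(nxt, bound):
--                 x, y = P[i]
--                 key = (x % 2, y % 2)
--                 d = x - y
--                 lo[key] = min(lo.get(key, d), d)
--                 hi[key] = max(hi.get(key, d), d)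
--             nxt = bound
--             xj, yj = P[j]
--             dj = xj - yj
--             k1 = (1 - xj % 2, yj % 2)   # a-count diff odd, b-count diff even
--             if k1 in lo:
--                 best = max(best, dj - lo[k1])
--             k2 = (xj % 2, 1 - yj % 2)   # a-count diff even, b-count diff odd
--             if k2 in hi:
--                 best = max(best, hi[k2] - dj)
--         return best
--
--     answer = NEG
--     for i in range(5):
--         for j in range(i + 1, 5):
--             answer = max(answer, helper(chr(48 + i), chr(48 + j)))
--     return answer
-- ===== Notes on version B (the rewrite author's own statement) =====
-- stated objective: alternative
-- what changed: Replaced A's scan over all prefix-index pairs (i,j) by a single forward pass per digit pair that admits prefix indices i <= j-k into min/max buckets keyed by the parity pair of the two prefix counts, so the best partner for each j is a bucket lookup instead of an inner loop.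
import Mathlib
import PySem

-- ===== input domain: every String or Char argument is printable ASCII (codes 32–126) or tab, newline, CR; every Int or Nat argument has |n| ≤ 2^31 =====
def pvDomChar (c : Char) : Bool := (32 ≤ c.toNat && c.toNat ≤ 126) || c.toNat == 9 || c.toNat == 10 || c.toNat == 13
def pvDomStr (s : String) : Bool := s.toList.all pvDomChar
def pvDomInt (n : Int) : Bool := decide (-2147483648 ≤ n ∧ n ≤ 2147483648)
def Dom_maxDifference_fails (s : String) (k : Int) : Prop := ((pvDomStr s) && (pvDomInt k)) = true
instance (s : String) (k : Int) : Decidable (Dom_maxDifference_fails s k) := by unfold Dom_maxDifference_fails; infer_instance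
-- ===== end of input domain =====

-- B replaces A's scan over all prefix-index pairs by one forward pass per digit pair with
-- min/max buckets keyed by prefix-count parities (a different algorithm of the same measured cost).

-- ===== PORT A =====
-- helper's prefix-building loop body: two sequential 'if's appending to prefix (prefix[-1] via pyGet?; the list is never empty)
def aPrefStep (a b : Char) (pre : List (Int × Int)) (c : Char) : List (Int × Int) :=
  let pre := if c == a then
      pre ++ [(((PySem.List.pyGet? pre (-1)).getD (0, 0)).1 + 1, ((PySem.List.pyGet? pre (-1)).getD (0, 0)).2)]
    else pre
  let pre := if c == b then
      pre ++ [(((PySem.List.pyGet? pre (-1)).getD (0, 0)).1, ((PySem.List.pyGet? pre (-1)).getD (0, 0)).2 + 1)]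
    else pre
  pre

-- helper's inner j-loop body; the '| _, _' branch is Python's IndexError (prefix[j], j < -len), excluded by Pre_
def aInnerStep (pre : List (Int × Int)) (i : Int) (answer : Int) (j : Int) : Int :=
  match PySem.List.pyGet? pre j, PySem.List.pyGet? pre i with
  | some pj, some pi =>
    let a := pj.1 - pi.1
    let b := pj.2 - pi.2
    if PySem.Int.mod a 2 == PySem.Int.mod b 2 then answer
    else if PySem.Int.mod a 2 != 0 then max answer (a - b) else max answer (b - a)
  | _, _ => answer

def aHelper (s : String) (k : Int) (a b : Char) : Int :=
  let answer : Int := -10 ^ 9 - 7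
  let pre := s.toList.foldl (aPrefStep a b) [(0, 0)]
  (PySem.List.pyRange 0 (pre.length : Int) 1).foldl (fun answer i =>
    (PySem.List.pyRange (i + k) (pre.length : Int) 1).foldl (aInnerStep pre i) answer) answer

def maxDifference_fails (s : String) (k : Int) : Int :=
  let answer : Int := -10 ^ 9 - 7
  (PySem.List.pyRange 0 5 1).foldl (fun answer i =>
    (PySem.List.pyRange (i + 1) 5 1).foldl (fun answer j =>
      max answer (aHelper s k (Char.ofNat (48 + i).toNat) (Char.ofNat (48 + j).toNat))) answer) answer

-- ===== PORT B =====
-- helper's prefix-building loop body (if/elif; P[-1] via pyGet?, P is never empty)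
def bPrefStep (a b : Char) (P : List (Int × Int)) (c : Char) : List (Int × Int) :=
  let t := (PySem.List.pyGet? P (-1)).getD (0, 0)
  if c == a then P ++ [(t.1 + 1, t.2)]
  else if c == b then P ++ [(t.1, t.2 + 1)]
  else P

-- body of the admission loop: lo[key] = min(lo.get(key,d), d); hi[key] = max(hi.get(key,d), d)
def bInsert (P : List (Int × Int)) (lh : PySem.Dict (Int × Int) Int × PySem.Dict (Int × Int) Int) (i : Int) :
    PySem.Dict (Int × Int) Int × PySem.Dict (Int × Int) Int :=
  let t := (PySem.List.pyGet? P i).getD (0, 0)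
  let key := (PySem.Int.mod t.1 2, PySem.Int.mod t.2 2)
  let d := t.1 - t.2
  (lh.1.insert key (min (lh.1.getD key d) d), lh.2.insert key (max (lh.2.getD key d) d))

-- body of the j-loop; state = (best, lo, hi, nxt)
def bStep (P : List (Int × Int)) (k m : Int)
    (st : Int × PySem.Dict (Int × Int) Int × PySem.Dict (Int × Int) Int × Int) (j : Int) :
    Int × PySem.Dict (Int × Int) Int × PySem.Dict (Int × Int) Int × Int :=
  let bound := min m (max st.2.2.2 (j - k + 1))
  let lh := (PySem.List.pyRange st.2.2.2 bound 1).foldl (bInsert P) (st.2.1, st.2.2.1)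
  let t := (PySem.List.pyGet? P j).getD (0, 0)
  let dj := t.1 - t.2
  let best := match lh.1.get? (1 - PySem.Int.mod t.1 2, PySem.Int.mod t.2 2) with
              | some v => max st.1 (dj - v)
              | none => st.1
  let best := match lh.2.get? (PySem.Int.mod t.1 2, 1 - PySem.Int.mod t.2 2) with
              | some w => max best (w - dj)
              | none => best
  (best, lh.1, lh.2, bound)

def bHelper (s : String) (k : Int) (a b : Char) : Int :=
  let P := s.toList.foldl (bPrefStep a b) [(0, 0)]
  let m : Int := (P.length : Int)
  ((PySem.List.pyRange 0 m 1).foldl (bStep P k m) (-10 ^ 9 - 7, PySem.Dict.empty, PySem.Dict.empty, 0)).1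

def maxDifference_fails_alt (s : String) (k : Int) : Int :=
  (PySem.List.pyRange 0 5 1).foldl (fun answer i =>
    (PySem.List.pyRange (i + 1) 5 1).foldl (fun answer j =>
      max answer (bHelper s k (Char.ofNat (48 + i).toNat) (Char.ofNat (48 + j).toNat))) answer) (-10 ^ 9 - 7)

-- ===== PRECONDITION & SPEC =====
-- the ten digit pairs chr(48+i), chr(48+j), 0 ≤ i < j < 5, that A's outer loops enumerate
def pvPairs : List (Char × Char) :=
  [('0','1'),('0','2'),('0','3'),('0','4'),('1','2'),('1','3'),('1','4'),('2','3'),('2','4'),('3','4')]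

-- Pre_ excludes exactly the inputs on which A raises IndexError: for some digit pair the loop probes
-- prefix[j] with j < -len(prefix), i.e. k < -(1 + count of the two digits in s).
def Pre_maxDifference_fails (s : String) (k : Int) : Prop :=
  ∀ p ∈ pvPairs, -(1 + (s.toList.count p.1 : Int) + (s.toList.count p.2 : Int)) ≤ k
instance (s : String) (k : Int) : Decidable (Pre_maxDifference_fails s k) := by
  unfold Pre_maxDifference_fails; infer_instance

def pvWitness_maxDifference_fails : String × Int := ("0110", 1)

def Spec_maxDifference_fails (s : String) (k : Int) (out : Int) : Prop := out = maxDifference_fails_alt s k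
instance (s : String) (k : Int) (out : Int) : Decidable (Spec_maxDifference_fails s k out) := by
  unfold Spec_maxDifference_fails; infer_instance

-- ===== CLAIM (what is proved, stated in full; the proofs are below) =====
def Claim_equal_maxDifference_fails : Prop := ∀ (s : String) (k : Int), Dom_maxDifference_fails s k →
  Pre_maxDifference_fails s k → Spec_maxDifference_fails s k (maxDifference_fails s k)

-- ===== LEMMAS AND PROOFS =====

-- the common prefix list, written as a structural recursion (both ports' folds compute it)
def Pref (a b : Char) (x y : Int) : List Char → List (Int × Int)
  | [] => [(x, y)]
  | c :: cs =>
      if c = a then (x, y) :: Pref a b (x + 1) y cs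
      else if c = b then (x, y) :: Pref a b x (y + 1) cs
      else Pref a b x y cs

-- score of an admissible index pair (none = parities equal, pair skipped)
def score (pi pj : Int × Int) : Option Int :=
  if (pj.1 - pi.1) % 2 = (pj.2 - pi.2) % 2 then none
  else if (pj.1 - pi.1) % 2 ≠ 0 then some ((pj.1 - pi.1) - (pj.2 - pi.2))
  else some ((pj.2 - pi.2) - (pj.1 - pi.1))

-- canonical list of scores of all valid pairs (i, j): i, j < |P|, i ≤ j - k
def VC (P : List (Int × Int)) (k : Int) : List Int :=
  (List.range P.length).flatMap fun (i : Nat) => (List.range P.length).filterMap fun (j : Nat) =>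
    if (i : Int) ≤ (j : Int) - k then score (P.getD i (0, 0)) (P.getD j (0, 0)) else none

-- ------- generic max-fold facts -------
theorem mfold_self_or_mem (l : List Int) (init : Int) :
    l.foldl max init = init ∨ l.foldl max init ∈ l := by
  induction l generalizing init with
  | nil => exact Or.inl rfl
  | cons x xs ih =>
    have hc : (x :: xs).foldl max init = xs.foldl max (max init x) := rfl
    rw [hc, List.mem_cons]
    rcases ih (max init x) with h | h
    · rw [h]
      rcases max_choice init x with h' | h' <;> rw [h']
      · exact Or.inl rfl
      · exact Or.inr (Or.inl rfl)
    · exact Or.inr (Or.inr h)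

theorem mfold_eq_of_mem_iff (l₁ l₂ : List Int) (init : Int) (h : ∀ x, x ∈ l₁ ↔ x ∈ l₂) :
    l₁.foldl max init = l₂.foldl max init := by
  have le₁ : l₁.foldl max init ≤ l₂.foldl max init := by
    rcases mfold_self_or_mem l₁ init with h1 | h1
    · rw [h1]; exact (PySem.List.le_foldl_max l₂ init).1
    · rw [show l₁.foldl max init ≤ l₂.foldl max init ↔ _ from Iff.rfl]
      exact (PySem.List.le_foldl_max l₂ init).2 _ ((h _).mp h1)
  have le₂ : l₂.foldl max init ≤ l₁.foldl max init := by
    rcases mfold_self_or_mem l₂ init with h1 | h1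
    · rw [h1]; exact (PySem.List.le_foldl_max l₁ init).1
    · exact (PySem.List.le_foldl_max l₁ init).2 _ ((h _).mpr h1)
  exact le_antisymm le₁ le₂

theorem foldl_optmax {α : Type} (f : α → Option Int) (l : List α) (init : Int) :
    l.foldl (fun r x => match f x with | some v => max r v | none => r) init =
      (l.filterMap f).foldl max init := by
  induction l generalizing init with
  | nil => rfl
  | cons x xs ih =>
    cases hf : f x <;> simp [List.foldl, hf, ih]

theorem foldl_mfold_flatMap {α : Type} (g : α → List Int) (l : List α) (init : Int) :
    l.foldl (fun r i => (g i).foldl max r) init = (l.flatMap g).foldl max init := by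
  induction l generalizing init with
  | nil => rfl
  | cons x xs ih => simp [List.foldl, List.flatMap_cons, List.foldl_append, ih]

-- ------- the prefix list -------
theorem aPref_eq (a b : Char) (hab : a ≠ b) :
    ∀ (cs : List Char) (front : List (Int × Int)) (x y : Int),
      cs.foldl (aPrefStep a b) (front ++ [(x, y)]) = front ++ Pref a b x y cs := by
  intro cs
  induction cs with
  | nil => intro front x y; simp [Pref]
  | cons c cs ih =>
    intro front x y
    have hba : ¬ b = a := fun h => hab h.symm
    have hstep : aPrefStep a b (front ++ [(x, y)]) c =
        (front ++ [(x, y)]) ++ (if c = a then [((x + 1 : Int), y)]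
          else if c = b then [(x, (y + 1 : Int))] else []) := by
      by_cases hca : c = a
      · have hcb : ¬ c = b := fun h => hab (hca.symm.trans h)
        simp [aPrefStep, hca, hab, PySem.List.pyGet?_neg_one_append_singleton]
      · by_cases hcb : c = b
        · simp [aPrefStep, hcb, hba, PySem.List.pyGet?_neg_one_append_singleton]
        · simp [aPrefStep, hca, hcb]
    show List.foldl (aPrefStep a b) (aPrefStep a b (front ++ [(x, y)]) c) cs = _
    rw [hstep]
    by_cases hca : c = a
    · rw [if_pos hca, ih (front ++ [(x, y)]) (x + 1) y]
      conv_rhs => rw [Pref]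
      rw [if_pos hca]
      simp
    · by_cases hcb : c = b
      · rw [if_neg hca, if_pos hcb, ih (front ++ [(x, y)]) x (y + 1)]
        conv_rhs => rw [Pref]
        rw [if_neg hca, if_pos hcb]
        simp
      · rw [if_neg hca, if_neg hcb, List.append_nil, ih front x y]
        conv_rhs => rw [Pref]
        rw [if_neg hca, if_neg hcb]

theorem bPref_eq (a b : Char) (hab : a ≠ b) :
    ∀ (cs : List Char) (front : List (Int × Int)) (x y : Int),
      cs.foldl (bPrefStep a b) (front ++ [(x, y)]) = front ++ Pref a b x y cs := by
  intro cs
  induction cs with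
  | nil => intro front x y; simp [Pref]
  | cons c cs ih =>
    intro front x y
    have hba : ¬ b = a := fun h => hab h.symm
    have hstep : bPrefStep a b (front ++ [(x, y)]) c =
        (front ++ [(x, y)]) ++ (if c = a then [((x + 1 : Int), y)]
          else if c = b then [(x, (y + 1 : Int))] else []) := by
      by_cases hca : c = a
      · have hcb : ¬ c = b := fun h => hab (hca.symm.trans h)
        simp [bPrefStep, hca, PySem.List.pyGet?_neg_one_append_singleton]
      · by_cases hcb : c = b
        · simp [bPrefStep, hcb, hba, PySem.List.pyGet?_neg_one_append_singleton]
        · simp [bPrefStep, hca, hcb]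
    show List.foldl (bPrefStep a b) (bPrefStep a b (front ++ [(x, y)]) c) cs = _
    rw [hstep]
    by_cases hca : c = a
    · rw [if_pos hca, ih (front ++ [(x, y)]) (x + 1) y]
      conv_rhs => rw [Pref]
      rw [if_pos hca]
      simp
    · by_cases hcb : c = b
      · rw [if_neg hca, if_pos hcb, ih (front ++ [(x, y)]) x (y + 1)]
        conv_rhs => rw [Pref]
        rw [if_neg hca, if_pos hcb]
        simp
      · rw [if_neg hca, if_neg hcb, List.append_nil, ih front x y]
        conv_rhs => rw [Pref]
        rw [if_neg hca, if_neg hcb]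

theorem length_Pref (a b : Char) (hab : a ≠ b) :
    ∀ (cs : List Char) (x y : Int),
      (Pref a b x y cs).length = 1 + cs.count a + cs.count b := by
  intro cs
  induction cs with
  | nil => intro x y; simp [Pref]
  | cons c cs ih =>
    intro x y
    have hba : ¬ b = a := fun h => hab h.symm
    by_cases hca : c = a
    · have hcb : ¬ c = b := fun h => hab (hca.symm.trans h)
      simp only [Pref, if_pos hca]
      simp [ih, hca, hab]
      omega
    · by_cases hcb : c = b
      · simp only [Pref, if_neg hca, if_pos hcb]
        simp [ih, hcb, hba]
        omega
      · simp only [Pref, if_neg hca, if_neg hcb]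
        simp [ih, hca, hcb]

-- ------- indexing helpers -------
theorem getP_nonneg (P : List (Int × Int)) (i : Int) (h0 : 0 ≤ i) (h1 : i < (P.length : Int)) :
    PySem.List.pyGet? P i = some (P.getD i.toNat (0, 0)) := by
  have hn : i.toNat < P.length := by omega
  rw [PySem.List.pyGet?_eq_some_getElem P h0 (by exact_mod_cast h1), List.getD_eq_getElem P (0, 0) hn]

theorem getP_neg (P : List (Int × Int)) (j : Int) (h0 : -(P.length : Int) ≤ j) (h1 : j < 0) :
    PySem.List.pyGet? P j = some (P.getD ((P.length : Int) + j).toNat (0, 0)) := by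
  obtain ⟨kk, hk1, hk2, hjeq⟩ : ∃ kk : Nat, 0 < kk ∧ kk ≤ P.length ∧ j = -(kk : Int) :=
    ⟨(-j).toNat, by omega, by omega, by omega⟩
  subst hjeq
  rw [PySem.List.pyGet?_neg_natCast P kk hk1 hk2, List.getElem?_eq_getElem (by omega)]
  have hidx2 : ((P.length : Int) + -(kk : Int)).toNat = P.length - kk := by omega
  rw [hidx2, List.getD_eq_getElem P (0, 0) (by omega)]

theorem mem_VC (P : List (Int × Int)) (k : Int) (x : Int) :
    x ∈ VC P k ↔ ∃ i j : Nat, i < P.length ∧ j < P.length ∧ (i : Int) ≤ (j : Int) - k ∧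
      score (P.getD i (0, 0)) (P.getD j (0, 0)) = some x := by
  unfold VC
  simp only [List.mem_flatMap, List.mem_range, List.mem_filterMap]
  constructor
  · rintro ⟨i, hi, j, hj, h⟩
    by_cases hc : (i : Int) ≤ (j : Int) - k
    · rw [if_pos hc] at h; exact ⟨i, j, hi, hj, hc, h⟩
    · rw [if_neg hc] at h; cases h
  · rintro ⟨i, j, hi, hj, hc, h⟩
    exact ⟨i, hi, j, hj, by rw [if_pos hc]; exact h⟩

-- the pair score as A's inner loop sees it through pyGet?
def gsc (P : List (Int × Int)) (i j : Int) : Option Int :=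
  (PySem.List.pyGet? P j).bind fun pj => (PySem.List.pyGet? P i).bind fun pi => score pi pj

theorem aInnerStep_eq (P : List (Int × Int)) (i : Int) :
    aInnerStep P i = fun ans j => match gsc P i j with | some v => max ans v | none => ans := by
  funext ans j
  unfold aInnerStep gsc
  have hm : ∀ z : Int, PySem.Int.mod z 2 = z % 2 := fun z => PySem.Int.mod_eq_emod_of_pos (by omega)
  cases hj : PySem.List.pyGet? P j with
  | none => simp
  | some pj =>
    cases hi : PySem.List.pyGet? P i with
    | none => simp
    | some pi =>
      simp only [Option.bind_some, score, hm]
      by_cases h1 : (pj.1 - pi.1) % 2 = (pj.2 - pi.2) % 2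
      · simp [h1]
      · by_cases h2 : (pj.1 - pi.1) % 2 = 0
        · have h1' : ¬ (0 : Int) = (pj.2 - pi.2) % 2 := by omega
          simp [h2, h1']
        · simp [h1, h2]

-- ------- A's helper = max-fold over VC -------
theorem aHelper_eq_mfold (s : String) (k : Int) (a b : Char) (hab : a ≠ b)
    (hk : -(1 + (s.toList.count a : Int) + (s.toList.count b : Int)) ≤ k) :
    aHelper s k a b = (VC (Pref a b 0 0 s.toList) k).foldl max (-10 ^ 9 - 7) := by
  have hpre : s.toList.foldl (aPrefStep a b) [(0, 0)] = Pref a b 0 0 s.toList := by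
    simpa using aPref_eq a b hab s.toList [] 0 0
  have h0 : aHelper s k a b =
      (PySem.List.pyRange 0 ((Pref a b 0 0 s.toList).length : Int) 1).foldl
        (fun answer i => (PySem.List.pyRange (i + k) ((Pref a b 0 0 s.toList).length : Int) 1).foldl
          (aInnerStep (Pref a b 0 0 s.toList) i) answer) (-10 ^ 9 - 7) := by
    unfold aHelper
    rw [hpre]
  rw [h0]
  set P := Pref a b 0 0 s.toList with hP
  have hklen : -(P.length : Int) ≤ k := by
    have := length_Pref a b hab s.toList 0 0
    rw [← hP] at this
    omega
  have hbody : (fun (answer : Int) (i : Int) =>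
      (PySem.List.pyRange (i + k) (P.length : Int) 1).foldl (aInnerStep P i) answer) =
      (fun answer i => ((PySem.List.pyRange (i + k) (P.length : Int) 1).filterMap (gsc P i)).foldl
        max answer) := by
    funext ans i
    rw [aInnerStep_eq, foldl_optmax]
  rw [hbody, foldl_mfold_flatMap]
  apply mfold_eq_of_mem_iff
  intro x
  rw [mem_VC]
  simp only [List.mem_flatMap, PySem.List.mem_pyRange_one, List.mem_filterMap]
  constructor
  · rintro ⟨i, ⟨hi0, him⟩, j, ⟨hj1, hjm⟩, hg⟩
    have hgeti := getP_nonneg P i hi0 him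
    by_cases hj0 : 0 ≤ j
    case pos =>
      have hgetj := getP_nonneg P j hj0 hjm
      refine ⟨i.toNat, j.toNat, by omega, by omega, by omega, ?_⟩
      simpa [gsc, hgeti, hgetj] using hg
    case neg =>
      have hj0' : j < 0 := by omega
      have hjlo : -(P.length : Int) ≤ j := by omega
      have hgetj := getP_neg P j hjlo hj0'
      refine ⟨i.toNat, ((P.length : Int) + j).toNat, by omega, by omega, by omega, ?_⟩
      simpa [gsc, hgeti, hgetj] using hg
  · rintro ⟨i, j, hi, hj, hc, hs⟩
    refine ⟨(i : Int), ⟨by omega, by exact_mod_cast hi⟩, (j : Int), ⟨by omega, by exact_mod_cast hj⟩, ?_⟩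
    have hgeti := getP_nonneg P (i : Int) (by omega) (by exact_mod_cast hi)
    have hgetj := getP_nonneg P (j : Int) (by omega) (by exact_mod_cast hj)
    simpa [gsc, hgeti, hgetj] using hs

-- ------- B's buckets -------
def keyf (P : List (Int × Int)) (i : Nat) : Int × Int :=
  ((P.getD i (0, 0)).1 % 2, (P.getD i (0, 0)).2 % 2)

def dvl (P : List (Int × Int)) (i : Nat) : Int :=
  (P.getD i (0, 0)).1 - (P.getD i (0, 0)).2

-- lo holds, per parity key, a witnessed lower bound of the deltas of the admitted prefixes [0, c)
def LoInv (P : List (Int × Int)) (lo : PySem.Dict (Int × Int) Int) (c : Nat) : Prop :=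
  (∀ κ v, lo.get? κ = some v → ∃ i : Nat, i < c ∧ keyf P i = κ ∧ dvl P i = v) ∧
  (∀ i : Nat, i < c → ∃ v, lo.get? (keyf P i) = some v ∧ v ≤ dvl P i)

def HiInv (P : List (Int × Int)) (hi : PySem.Dict (Int × Int) Int) (c : Nat) : Prop :=
  (∀ κ v, hi.get? κ = some v → ∃ i : Nat, i < c ∧ keyf P i = κ ∧ dvl P i = v) ∧
  (∀ i : Nat, i < c → ∃ v, hi.get? (keyf P i) = some v ∧ dvl P i ≤ v)

theorem bInsert_pres (P : List (Int × Int)) (lo hi : PySem.Dict (Int × Int) Int) (c : Nat)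
    (hc : c < P.length) (hlo : LoInv P lo c) (hhi : HiInv P hi c) :
    LoInv P (bInsert P (lo, hi) (c : Int)).1 (c + 1) ∧
    HiInv P (bInsert P (lo, hi) (c : Int)).2 (c + 1) := by
  have hm : ∀ z : Int, PySem.Int.mod z 2 = z % 2 := fun z => PySem.Int.mod_eq_emod_of_pos (by omega)
  have hget : PySem.List.pyGet? P (c : Int) = some (P.getD c (0, 0)) := by
    have h := getP_nonneg P (c : Int) (by omega) (by exact_mod_cast hc)
    simpa using h
  have hb : bInsert P (lo, hi) (c : Int) =
      (lo.insert (keyf P c) (min (lo.getD (keyf P c) (dvl P c)) (dvl P c)),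
       hi.insert (keyf P c) (max (hi.getD (keyf P c) (dvl P c)) (dvl P c))) := by
    simp [bInsert, hget, keyf, dvl]
  rw [hb]
  refine ⟨⟨?_, ?_⟩, ⟨?_, ?_⟩⟩
  · -- lo witnesses
    intro κ v h
    rw [PySem.Dict.get?_insert] at h
    by_cases hκ : κ = keyf P c
    · rw [if_pos hκ] at h
      cases hv : lo.get? (keyf P c) with
      | none =>
        rw [PySem.Dict.getD_eq_get?_getD, hv] at h
        exact ⟨c, by omega, hκ.symm, by simp at h; omega⟩
      | some v0 =>
        rw [PySem.Dict.getD_eq_get?_getD, hv] at h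
        simp at h
        rcases min_choice v0 (dvl P c) with hmin | hmin
        · obtain ⟨i0, hi0, hk0, hd0⟩ := hlo.1 _ _ hv
          exact ⟨i0, by omega, hk0.trans hκ.symm, by omega⟩
        · exact ⟨c, by omega, hκ.symm, by omega⟩
    · rw [if_neg hκ] at h
      obtain ⟨i0, hi0, hk0, hd0⟩ := hlo.1 _ _ h
      exact ⟨i0, by omega, hk0, hd0⟩
  · -- lo bounds
    intro i hic
    by_cases hik : keyf P i = keyf P c
    · refine ⟨min (lo.getD (keyf P c) (dvl P c)) (dvl P c), ?_, ?_⟩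
      · rw [PySem.Dict.get?_insert, if_pos hik]
      · rcases Nat.lt_or_ge i c with hic' | hic'
        · obtain ⟨v0, hv0, hle⟩ := hlo.2 i hic'
          rw [hik] at hv0
          rw [PySem.Dict.getD_eq_get?_getD, hv0]
          simp
          left
          exact hle
        · have : i = c := by omega
          subst this
          exact min_le_right _ _
    · have : i < c := by
        rcases Nat.lt_or_ge i c with h' | h'
        · exact h'
        · have : i = c := by omega
          exact absurd (this ▸ rfl) hik
      obtain ⟨v0, hv0, hle⟩ := hlo.2 i this
      refine ⟨v0, ?_, hle⟩
      rw [PySem.Dict.get?_insert, if_neg hik, hv0]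
  · -- hi witnesses
    intro κ v h
    rw [PySem.Dict.get?_insert] at h
    by_cases hκ : κ = keyf P c
    · rw [if_pos hκ] at h
      cases hv : hi.get? (keyf P c) with
      | none =>
        rw [PySem.Dict.getD_eq_get?_getD, hv] at h
        exact ⟨c, by omega, hκ.symm, by simp at h; omega⟩
      | some v0 =>
        rw [PySem.Dict.getD_eq_get?_getD, hv] at h
        simp at h
        rcases max_choice v0 (dvl P c) with hmax | hmax
        · obtain ⟨i0, hi0, hk0, hd0⟩ := hhi.1 _ _ hv
          exact ⟨i0, by omega, hk0.trans hκ.symm, by omega⟩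
        · exact ⟨c, by omega, hκ.symm, by omega⟩
    · rw [if_neg hκ] at h
      obtain ⟨i0, hi0, hk0, hd0⟩ := hhi.1 _ _ h
      exact ⟨i0, by omega, hk0, hd0⟩
  · -- hi bounds
    intro i hic
    by_cases hik : keyf P i = keyf P c
    · refine ⟨max (hi.getD (keyf P c) (dvl P c)) (dvl P c), ?_, ?_⟩
      · rw [PySem.Dict.get?_insert, if_pos hik]
      · rcases Nat.lt_or_ge i c with hic' | hic'
        · obtain ⟨v0, hv0, hle⟩ := hhi.2 i hic'
          rw [hik] at hv0
          rw [PySem.Dict.getD_eq_get?_getD, hv0]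
          simp
          left
          exact hle
        · have : i = c := by omega
          subst this
          exact le_max_right _ _
    · have : i < c := by
        rcases Nat.lt_or_ge i c with h' | h'
        · exact h'
        · have : i = c := by omega
          exact absurd (this ▸ rfl) hik
      obtain ⟨v0, hv0, hle⟩ := hhi.2 i this
      refine ⟨v0, ?_, hle⟩
      rw [PySem.Dict.get?_insert, if_neg hik, hv0]

theorem insLoop (P : List (Int × Int)) :
    ∀ (n c : Nat) (lo hi : PySem.Dict (Int × Int) Int), c + n ≤ P.length →
      LoInv P lo c → HiInv P hi c →
      LoInv P ((PySem.List.pyRange (c : Int) ((c + n : Nat) : Int) 1).foldl (bInsert P) (lo, hi)).1 (c + n) ∧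
      HiInv P ((PySem.List.pyRange (c : Int) ((c + n : Nat) : Int) 1).foldl (bInsert P) (lo, hi)).2 (c + n) := by
  intro n
  induction n with
  | zero =>
    intro c lo hi _ hlo hhi
    rw [show ((c + 0 : Nat) : Int) = (c : Int) by omega, PySem.List.pyRange_one_eq_nil le_rfl]
    exact ⟨hlo, hhi⟩
  | succ n ih =>
    intro c lo hi hcn hlo hhi
    have hlt : (c : Int) < ((c + (n + 1) : Nat) : Int) := by push_cast; omega
    rw [PySem.List.pyRange_one_cons hlt]
    rw [List.foldl_cons]
    have hpair : bInsert P (lo, hi) (c : Int) =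
        ((bInsert P (lo, hi) (c : Int)).1, (bInsert P (lo, hi) (c : Int)).2) := rfl
    obtain ⟨hlo1, hhi1⟩ := bInsert_pres P lo hi c (by omega) hlo hhi
    have hrw : ((c : Int) + 1) = (((c + 1 : Nat)) : Int) := by push_cast; ring
    have hrw2 : ((c + (n + 1) : Nat) : Int) = (((c + 1) + n : Nat) : Int) := by push_cast; ring
    rw [hpair, hrw, hrw2, show c + (n + 1) = c + 1 + n from by omega]
    exact ih (c + 1) (bInsert P (lo, hi) (c : Int)).1 (bInsert P (lo, hi) (c : Int)).2
      (by omega) hlo1 hhi1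

-- ------- score and parity -------
theorem score_of_key1 (ti tj : Int × Int) (h : (ti.1 % 2, ti.2 % 2) = ((1 : Int) - tj.1 % 2, tj.2 % 2)) :
    score ti tj = some ((tj.1 - tj.2) - (ti.1 - ti.2)) := by
  have h1 : ti.1 % 2 = 1 - tj.1 % 2 := congrArg Prod.fst h
  have h2 : ti.2 % 2 = tj.2 % 2 := congrArg Prod.snd h
  unfold score
  rw [if_neg (by omega), if_pos (by omega)]
  congr 1
  ring

theorem score_of_key2 (ti tj : Int × Int) (h : (ti.1 % 2, ti.2 % 2) = (tj.1 % 2, (1 : Int) - tj.2 % 2)) :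
    score ti tj = some ((ti.1 - ti.2) - (tj.1 - tj.2)) := by
  have h1 : ti.1 % 2 = tj.1 % 2 := congrArg Prod.fst h
  have h2 : ti.2 % 2 = 1 - tj.2 % 2 := congrArg Prod.snd h
  unfold score
  rw [if_neg (by omega), if_neg (by omega)]
  congr 1
  ring

theorem score_cases (ti tj : Int × Int) (v : Int) (h : score ti tj = some v) :
    ((ti.1 % 2, ti.2 % 2) = ((1 : Int) - tj.1 % 2, tj.2 % 2) ∧ v = (tj.1 - tj.2) - (ti.1 - ti.2)) ∨
    ((ti.1 % 2, ti.2 % 2) = (tj.1 % 2, (1 : Int) - tj.2 % 2) ∧ v = (ti.1 - ti.2) - (tj.1 - tj.2)) := by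
  unfold score at h
  by_cases h1 : (tj.1 - ti.1) % 2 = (tj.2 - ti.2) % 2
  · rw [if_pos h1] at h; cases h
  · rw [if_neg h1] at h
    by_cases h2 : (tj.1 - ti.1) % 2 = 0
    · rw [if_neg (by omega)] at h
      injection h with h
      right
      have e1 : ti.1 % 2 = tj.1 % 2 := by omega
      have e2 : ti.2 % 2 = 1 - tj.2 % 2 := by omega
      exact ⟨by rw [e1, e2], by omega⟩
    · rw [if_pos (by omega)] at h
      injection h with h
      left
      have e1 : ti.1 % 2 = 1 - tj.1 % 2 := by omega
      have e2 : ti.2 % 2 = tj.2 % 2 := by omega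
      exact ⟨by rw [e1, e2], by omega⟩

-- ------- the loop invariant of B's j-pass -------
def BInv (P : List (Int × Int)) (k : Int) (J : Nat)
    (st : Int × PySem.Dict (Int × Int) Int × PySem.Dict (Int × Int) Int × Int) : Prop :=
  ∃ c : Nat, st.2.2.2 = (c : Int) ∧ c ≤ P.length ∧ (c : Int) ≤ max 0 ((J : Int) - k) ∧
    LoInv P st.2.1 c ∧ HiInv P st.2.2.1 c ∧
    (-10 ^ 9 - 7 : Int) ≤ st.1 ∧
    (st.1 = -10 ^ 9 - 7 ∨ ∃ i j : Nat, i < P.length ∧ j < P.length ∧ (i : Int) ≤ (j : Int) - k ∧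
        score (P.getD i (0, 0)) (P.getD j (0, 0)) = some st.1) ∧
    (∀ i j : Nat, i < P.length → j < J → (i : Int) ≤ (j : Int) - k →
        ∀ v, score (P.getD i (0, 0)) (P.getD j (0, 0)) = some v → v ≤ st.1)

theorem bStep_eq (P : List (Int × Int)) (k m best : Int) (lo hi : PySem.Dict (Int × Int) Int)
    (nxt j : Int) (tj : Int × Int) (hget : (PySem.List.pyGet? P j).getD (0, 0) = tj) :
    bStep P k m (best, lo, hi, nxt) j =
      ((match ((PySem.List.pyRange nxt (min m (max nxt (j - k + 1))) 1).foldl (bInsert P) (lo, hi)).2.get?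
            (tj.1 % 2, 1 - tj.2 % 2) with
        | some w => max (match ((PySem.List.pyRange nxt (min m (max nxt (j - k + 1))) 1).foldl (bInsert P) (lo, hi)).1.get?
              (1 - tj.1 % 2, tj.2 % 2) with
            | some v => max best (tj.1 - tj.2 - v)
            | none => best) (w - (tj.1 - tj.2))
        | none => (match ((PySem.List.pyRange nxt (min m (max nxt (j - k + 1))) 1).foldl (bInsert P) (lo, hi)).1.get?
              (1 - tj.1 % 2, tj.2 % 2) with
            | some v => max best (tj.1 - tj.2 - v)
            | none => best)),
       ((PySem.List.pyRange nxt (min m (max nxt (j - k + 1))) 1).foldl (bInsert P) (lo, hi)).1,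
       ((PySem.List.pyRange nxt (min m (max nxt (j - k + 1))) 1).foldl (bInsert P) (lo, hi)).2,
       min m (max nxt (j - k + 1))) := by
  have hm : ∀ z : Int, PySem.Int.mod z 2 = z % 2 := fun z => PySem.Int.mod_eq_emod_of_pos (by omega)
  subst hget
  simp only [bStep, hm]

theorem bStep_pres (P : List (Int × Int)) (k : Int) (J c : Nat) (best : Int)
    (lo hi : PySem.Dict (Int × Int) Int) (hJ : J < P.length)
    (hcm : c ≤ P.length) (hcmax : (c : Int) ≤ max 0 ((J : Int) - k))
    (hlo : LoInv P lo c) (hhi : HiInv P hi c)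
    (hbest0 : (-10 ^ 9 - 7 : Int) ≤ best)
    (hsound : best = -10 ^ 9 - 7 ∨ ∃ i j : Nat, i < P.length ∧ j < P.length ∧
        (i : Int) ≤ (j : Int) - k ∧ score (P.getD i (0, 0)) (P.getD j (0, 0)) = some best)
    (hcomp : ∀ i j : Nat, i < P.length → j < J → (i : Int) ≤ (j : Int) - k →
        ∀ v, score (P.getD i (0, 0)) (P.getD j (0, 0)) = some v → v ≤ best) :
    BInv P k (J + 1) (bStep P k (P.length : Int) (best, lo, hi, (c : Int)) ((J : Nat) : Int)) := by
  have htj : (PySem.List.pyGet? P ((J : Nat) : Int)).getD (0, 0) = P.getD J (0, 0) := by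
    have h := getP_nonneg P (J : Int) (by omega) (by exact_mod_cast hJ)
    rw [show PySem.List.pyGet? P ((J : Nat) : Int) = PySem.List.pyGet? P (J : Int) from rfl, h]
    simp
  rw [bStep_eq P k (P.length : Int) best lo hi (c : Int) ((J : Nat) : Int) (P.getD J (0, 0)) htj]
  set tJ := P.getD J (0, 0) with htJdef
  obtain ⟨n, hn⟩ : ∃ n : Nat,
      min ((P.length : Int)) (max ((c : Int)) (((J : Nat) : Int) - k + 1)) = ((c + n : Nat) : Int) :=
    ⟨(min ((P.length : Int)) (max ((c : Int)) (((J : Nat) : Int) - k + 1)) - (c : Int)).toNat,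
      by push_cast; omega⟩
  have hA : ((c + n : Nat) : Int) ≤ (P.length : Int) := by rw [← hn]; exact min_le_left _ _
  have hB : ((c + n : Nat) : Int) ≤ (c : Int) ∨ ((c + n : Nat) : Int) ≤ ((J : Nat) : Int) - k + 1 :=
    le_max_iff.mp (hn ▸ min_le_right _ _)
  have hD : (P.length : Int) = ((c + n : Nat) : Int) ∨ (((J : Nat) : Int) - k + 1) ≤ ((c + n : Nat) : Int) := by
    rcases min_choice ((P.length : Int)) (max ((c : Int)) (((J : Nat) : Int) - k + 1)) with h | h
    · left; rw [hn] at h; exact h.symm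
    · right; rw [hn] at h; rw [h]; exact le_max_right _ _
  have hE : (c : Int) ≤ 0 ∨ (c : Int) ≤ ((J : Nat) : Int) - k := le_max_iff.mp hcmax
  have hcnm : c + n ≤ P.length := by exact_mod_cast hA
  rw [hn]
  clear hcmax
  obtain ⟨hlo2, hhi2⟩ := insLoop P n c lo hi hcnm hlo hhi
  set lh := (PySem.List.pyRange (c : Int) ((c + n : Nat) : Int) 1).foldl (bInsert P) (lo, hi) with hlh
  clear_value lh
  clear hlh hn
  -- the two candidate updates
  have hvalid : ∀ i : Nat, i < c + n → i < P.length ∧ (i : Int) ≤ ((J : Nat) : Int) - k := by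
    intro i hi
    refine ⟨by omega, ?_⟩
    rcases hB with h | h
    · rcases hE with h0 | h0 <;> (push_cast at h h0 ⊢; omega)
    · push_cast at h ⊢
      omega
  refine ⟨c + n, rfl, hcnm, ?_, hlo2, hhi2, ?_, ?_, ?_⟩
  · rcases hB with h | h
    · rcases hE with h0 | h0
      · exact le_max_iff.mpr (Or.inl (by push_cast at h h0 ⊢; omega))
      · exact le_max_iff.mpr (Or.inr (by push_cast at h h0 ⊢; omega))
    · exact le_max_iff.mpr (Or.inr (by push_cast at h ⊢; omega))
  · -- NEG ≤ new best
    cases h2 : lh.2.get? (tJ.1 % 2, 1 - tJ.2 % 2) <;> cases h1 : lh.1.get? (1 - tJ.1 % 2, tJ.2 % 2) <;>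
      simp only [le_max_iff] <;> first
        | exact hbest0
        | exact Or.inl hbest0
        | exact Or.inl (Or.inl hbest0)
  · -- soundness of new best: candidate values are scores of valid pairs
    have hcand1 : ∀ v, lh.1.get? (1 - tJ.1 % 2, tJ.2 % 2) = some v →
        ∃ i : Nat, i < P.length ∧ (i : Int) ≤ (J : Int) - k ∧
          score (P.getD i (0, 0)) tJ = some (tJ.1 - tJ.2 - v) := by
      intro v hv
      obtain ⟨i, hic, hkey, hd⟩ := hlo2.1 _ _ hv
      obtain ⟨hilen, hival⟩ := hvalid i hic
      refine ⟨i, hilen, by exact_mod_cast hival, ?_⟩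
      have := score_of_key1 (P.getD i (0, 0)) tJ (by simpa [keyf] using hkey)
      rw [this]
      congr 1
      unfold dvl at hd
      omega
    have hcand2 : ∀ w, lh.2.get? (tJ.1 % 2, 1 - tJ.2 % 2) = some w →
        ∃ i : Nat, i < P.length ∧ (i : Int) ≤ (J : Int) - k ∧
          score (P.getD i (0, 0)) tJ = some (w - (tJ.1 - tJ.2)) := by
      intro w hw
      obtain ⟨i, hic, hkey, hd⟩ := hhi2.1 _ _ hw
      obtain ⟨hilen, hival⟩ := hvalid i hic
      refine ⟨i, hilen, by exact_mod_cast hival, ?_⟩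
      have := score_of_key2 (P.getD i (0, 0)) tJ (by simpa [keyf] using hkey)
      rw [this]
      congr 1
      unfold dvl at hd
      omega
    cases h2 : lh.2.get? (tJ.1 % 2, 1 - tJ.2 % 2) with
    | none =>
      cases h1 : lh.1.get? (1 - tJ.1 % 2, tJ.2 % 2) with
      | none => exact hsound
      | some v =>
        dsimp only
        rcases max_choice best (tJ.1 - tJ.2 - v) with hmx | hmx <;> rw [hmx]
        · exact hsound
        · obtain ⟨i, hilen, hival, hsc⟩ := hcand1 v h1
          exact Or.inr ⟨i, J, hilen, hJ, hival, hsc⟩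
    | some w =>
      cases h1 : lh.1.get? (1 - tJ.1 % 2, tJ.2 % 2) with
      | none =>
        dsimp only
        rcases max_choice best (w - (tJ.1 - tJ.2)) with hmx | hmx <;> rw [hmx]
        · exact hsound
        · obtain ⟨i, hilen, hival, hsc⟩ := hcand2 w h2
          exact Or.inr ⟨i, J, hilen, hJ, hival, hsc⟩
      | some v =>
        dsimp only
        rcases max_choice (max best (tJ.1 - tJ.2 - v)) (w - (tJ.1 - tJ.2)) with hmx | hmx <;> rw [hmx]
        · rcases max_choice best (tJ.1 - tJ.2 - v) with hmx2 | hmx2 <;> rw [hmx2]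
          · exact hsound
          · obtain ⟨i, hilen, hival, hsc⟩ := hcand1 v h1
            exact Or.inr ⟨i, J, hilen, hJ, hival, hsc⟩
        · obtain ⟨i, hilen, hival, hsc⟩ := hcand2 w h2
          exact Or.inr ⟨i, J, hilen, hJ, hival, hsc⟩
  · -- completeness up to J + 1
    intro i j hilen hjJ1 hij v hsc
    rcases Nat.lt_or_ge j J with hjJ | hjJ
    · -- old pair: new best dominates old best
      have hold := hcomp i j hilen hjJ hij v hsc
      cases h2 : lh.2.get? (tJ.1 % 2, 1 - tJ.2 % 2) <;>
        cases h1 : lh.1.get? (1 - tJ.1 % 2, tJ.2 % 2) <;>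
          simp only [le_max_iff] <;> first
            | exact hold
            | exact Or.inl hold
            | exact Or.inl (Or.inl hold)
    · -- j = J
      have hjeq : j = J := by omega
      subst hjeq
      have hiin : i < c + n := by
        rcases hD with h | h <;> (push_cast at h; omega)
      rcases score_cases (P.getD i (0, 0)) tJ v hsc with ⟨hkey, hveq⟩ | ⟨hkey, hveq⟩
      · obtain ⟨v0, hv0, hle0⟩ := hlo2.2 i hiin
        have hkk : keyf P i = ((1 : Int) - tJ.1 % 2, tJ.2 % 2) := by simpa [keyf] using hkey
        rw [hkk] at hv0
        have hv1 : v ≤ tJ.1 - tJ.2 - v0 := by unfold dvl at hle0; omega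
        cases h2 : lh.2.get? (tJ.1 % 2, 1 - tJ.2 % 2) <;> simp only [hv0]
        · exact le_max_of_le_right hv1
        · exact le_max_of_le_left (le_max_of_le_right hv1)
      · obtain ⟨w0, hw0, hge0⟩ := hhi2.2 i hiin
        have hkk : keyf P i = (tJ.1 % 2, (1 : Int) - tJ.2 % 2) := by simpa [keyf] using hkey
        rw [hkk] at hw0
        have hv1 : v ≤ w0 - (tJ.1 - tJ.2) := by unfold dvl at hge0; omega
        simp only [hw0]
        exact le_max_of_le_right hv1
theorem bFold_inv (P : List (Int × Int)) (k : Int) :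
    ∀ J : Nat, J ≤ P.length →
      BInv P k J ((PySem.List.pyRange 0 ((J : Nat) : Int) 1).foldl
        (bStep P k (P.length : Int)) (-10 ^ 9 - 7, PySem.Dict.empty, PySem.Dict.empty, 0)) := by
  intro J
  induction J with
  | zero =>
    intro _
    rw [show ((0 : Nat) : Int) = 0 from rfl, PySem.List.pyRange_one_eq_nil le_rfl, List.foldl_nil]
    refine ⟨0, rfl, by omega, by simp, ⟨?_, ?_⟩, ⟨?_, ?_⟩, le_rfl, Or.inl rfl, ?_⟩
    · intro κ v h
      rw [PySem.Dict.get?_empty] at h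
      cases h
    · intro i h
      omega
    · intro κ v h
      rw [PySem.Dict.get?_empty] at h
      cases h
    · intro i h
      omega
    · intro i j _ hj
      omega
  | succ J ih =>
    intro h
    have hJ : J < P.length := by omega
    have hr : PySem.List.pyRange 0 (((J + 1 : Nat)) : Int) 1 =
        PySem.List.pyRange 0 ((J : Nat) : Int) 1 ++ [((J : Nat) : Int)] := by
      push_cast
      exact PySem.List.pyRange_one_succ_right (by omega)
    rw [hr, List.foldl_append, List.foldl_cons, List.foldl_nil]
    obtain ⟨c, hnxt, hcm, hcmax, hlo, hhi, hb0, hsound, hcomp⟩ := ih (by omega)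
    set st := (PySem.List.pyRange 0 ((J : Nat) : Int) 1).foldl (bStep P k (P.length : Int))
      (-10 ^ 9 - 7, PySem.Dict.empty, PySem.Dict.empty, 0) with hst
    have heta : st = (st.1, st.2.1, st.2.2.1, (c : Int)) := by
      rw [← hnxt]
    rw [heta]
    exact bStep_pres P k J c st.1 st.2.1 st.2.2.1 hJ hcm hcmax hlo hhi hb0 hsound hcomp

-- ------- B's helper = max-fold over VC -------
theorem bHelper_eq_mfold (s : String) (k : Int) (a b : Char) (hab : a ≠ b) :
    bHelper s k a b = (VC (Pref a b 0 0 s.toList) k).foldl max (-10 ^ 9 - 7) := by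
  have hpre : s.toList.foldl (bPrefStep a b) [(0, 0)] = Pref a b 0 0 s.toList := by
    simpa using bPref_eq a b hab s.toList [] 0 0
  have h0 : bHelper s k a b =
      ((PySem.List.pyRange 0 ((Pref a b 0 0 s.toList).length : Int) 1).foldl
        (bStep (Pref a b 0 0 s.toList) k ((Pref a b 0 0 s.toList).length : Int))
        (-10 ^ 9 - 7, PySem.Dict.empty, PySem.Dict.empty, 0)).1 := by
    unfold bHelper
    rw [hpre]
  rw [h0]
  set P := Pref a b 0 0 s.toList with hP
  obtain ⟨c, hnxt, hcm, hcmax, hlo, hhi, hb0, hsound, hcomp⟩ := bFold_inv P k P.length le_rfl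
  apply le_antisymm
  · rcases hsound with h | ⟨i, j, hi, hj, hc, hs⟩
    · rw [h]
      exact (PySem.List.le_foldl_max _ _).1
    · exact (PySem.List.le_foldl_max _ _).2 _ ((mem_VC P k _).mpr ⟨i, j, hi, hj, hc, hs⟩)
  · rcases mfold_self_or_mem (VC P k) (-10 ^ 9 - 7) with h | h
    · rw [h]
      exact hb0
    · obtain ⟨i, j, hi, hj, hc, hs⟩ := (mem_VC P k _).mp h
      exact hcomp i j hi hj hc _ hs

theorem helpers_eq (s : String) (k : Int) (a b : Char) (hab : a ≠ b)
    (hk : -(1 + (s.toList.count a : Int) + (s.toList.count b : Int)) ≤ k) :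
    aHelper s k a b = bHelper s k a b := by
  rw [aHelper_eq_mfold s k a b hab hk, bHelper_eq_mfold s k a b hab]

-- ===== VERDICT (by name: the statement is the Claim_ definition above) =====
theorem maxDifference_fails_spec : Claim_equal_maxDifference_fails := by
  intro s k _hdom hpre
  unfold Spec_maxDifference_fails maxDifference_fails maxDifference_fails_alt
  apply PySem.List.foldl_congr_mem
  intro acc i hi
  apply PySem.List.foldl_congr_mem
  intro acc2 j hj
  congr 1
  rw [PySem.List.mem_pyRange_one] at hi hj
  obtain ⟨hi0, hi5⟩ := hi
  obtain ⟨hj1, hj5⟩ := hj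
  interval_cases i <;> interval_cases j <;>
    exact helpers_eq s k _ _ (by decide) (hpre (_, _) (by decide))
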